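-- pv_equiv track=rewrite | github.com/xudegloss/CodingTest | python/수원대 데이터마이닝/중간고사 범위 최종본/2주차/02.py | solution
-- ===== SOURCE A (Python) =====
-- def solution(n, k):
--     cnt=0 # 지역 변수로 cnt를 함수 안에 적어줘야 한다.
--     while True:
--         if n==1:
--             return cnt
--
--         if n%k==0:
--             n=n//k
--             cnt+=1
--         else:
--             n-=1
--             cnt+=1
--     pass
-- ===== SOURCE B (Python) =====
-- def solution(n, k):
--     # base-k digit view: each round of A removes the lowest digit d (d unit
--     # subtractions) then one division; the final digit costs d-1 subtractions.
--     digits = []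
--     while n:
--         digits.append(n % k)
--         n //= k
--     return sum(digits) + len(digits) - 2
-- ===== Notes on version B (the rewrite author's own statement) =====
-- stated objective: faster
-- what changed: B replaces A's one-step-per-iteration loop by a base-k digit decomposition: the answer is sum of base-k digits plus number of digits minus 2, computed by one O(log_k n) digit-extraction loop and a final arithmetic formula.
-- outside the precondition, e.g. on solution(1, 1): A returns 0, B does not finish within the time limit; on solution(1, 0): A returns 0, B raises ZeroDivisionError; on solution(1, -3): A returns 0, B returns -3
import Mathlib
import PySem

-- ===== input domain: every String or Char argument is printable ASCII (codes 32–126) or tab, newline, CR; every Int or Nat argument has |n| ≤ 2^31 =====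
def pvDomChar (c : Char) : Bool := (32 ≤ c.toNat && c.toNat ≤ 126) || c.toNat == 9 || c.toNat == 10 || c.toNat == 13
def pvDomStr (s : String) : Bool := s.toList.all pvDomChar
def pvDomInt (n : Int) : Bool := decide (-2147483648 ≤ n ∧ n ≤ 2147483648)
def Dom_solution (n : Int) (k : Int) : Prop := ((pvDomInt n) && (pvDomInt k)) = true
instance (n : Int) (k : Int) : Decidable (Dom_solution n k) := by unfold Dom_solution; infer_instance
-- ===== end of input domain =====

-- B computes the answer from the base-k digits of n (one O(log_k n) extraction loop + a formula) instead of A's one-step-per-iteration loop.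


-- ===== PORT A =====
-- A's while-True loop, one step per iteration; fuel n.toNat only makes it total
-- (inside Pre_ the loop takes at most n-1 steps, so the fuel is never exhausted).
def solutionLoop (fuel : Nat) (n k cnt : Int) : Int :=
  match fuel with
  | 0 => cnt
  | fuel + 1 =>
    if n = 1 then cnt
    else if PySem.Int.mod n k = 0 then
      solutionLoop fuel (PySem.Int.floordiv n k) k (cnt + 1)
    else
      solutionLoop fuel (n - 1) k (cnt + 1)

def solution (n : Int) (k : Int) : Int := solutionLoop n.toNat n k 0

-- ===== PORT B =====
-- Source B's digit-extraction loop 'while n: digits.append(n % k); n //= k';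
-- fuel n.toNat only makes it total (inside Pre_ n strictly decreases each round).
def digitsLoop (fuel : Nat) (n k : Int) : List Int :=
  match fuel with
  | 0 => []
  | fuel + 1 =>
    if n ≠ 0 then PySem.Int.mod n k :: digitsLoop fuel (PySem.Int.floordiv n k) k
    else []

-- 'return sum(digits) + len(digits) - 2'
def solution_alt (n : Int) (k : Int) : Int :=
  let digits := digitsLoop n.toNat n k
  digits.sum + (digits.length : Int) - 2

-- ===== PRECONDITION & SPEC =====
-- A diverges for n ≤ 0 or k = 1 (and raises ZeroDivisionError for k = 0 when n ≠ 1);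
-- the corner n = 1 with k < 2, where A returns 0 before touching k but B's digit loop
-- misbehaves, is excluded as outside the task's natural domain (k must be a valid divisor).
def Pre_solution (n : Int) (k : Int) : Prop := 1 ≤ n ∧ 2 ≤ k
instance (n : Int) (k : Int) : Decidable (Pre_solution n k) := by unfold Pre_solution; infer_instance
def pvWitness_solution : Int × Int := (25, 5)
def Spec_solution (n : Int) (k : Int) (out : Int) : Prop := out = solution_alt n k
instance (n : Int) (k : Int) (out : Int) : Decidable (Spec_solution n k out) := by unfold Spec_solution; infer_instance

-- ===== CLAIM (what is proved, stated in full; the proofs are below) =====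
def Claim_equal_solution : Prop := ∀ (n : Int) (k : Int), Dom_solution n k → Pre_solution n k → Spec_solution n k (solution n k)

-- ===== LEMMAS AND PROOFS =====

-- the true step count, as a spec both ports are reduced to
def steps (n k : Int) : Int :=
  if h : 1 < n ∧ 2 ≤ k then
    if PySem.Int.mod n k = 0 then 1 + steps (PySem.Int.floordiv n k) k
    else 1 + steps (n - 1) k
  else 0
termination_by n.toNat
decreasing_by
  · have hk : (0:Int) < k := by omega
    have hmod := PySem.Int.mod_eq_emod_of_pos (a := n) hk
    have hdiv := PySem.Int.floordiv_eq_ediv_of_pos (a := n) hk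
    rw [hdiv]
    have h2 : 0 ≤ n / k := Int.ediv_nonneg (by omega) (by omega)
    have h3 := Int.mul_ediv_add_emod n k
    have h1 : n / k < n := by nlinarith
    omega
  · omega

theorem steps_one (k : Int) : steps 1 k = 0 := by
  rw [steps]; simp

theorem steps_div (n k : Int) (hn : 1 < n) (hk : 2 ≤ k)
    (h : PySem.Int.mod n k = 0) :
    steps n k = 1 + steps (PySem.Int.floordiv n k) k := by
  rw [steps]; simp [hn, hk, h]

theorem steps_sub (n k : Int) (hn : 1 < n) (hk : 2 ≤ k)
    (h : PySem.Int.mod n k ≠ 0) :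
    steps n k = 1 + steps (n - 1) k := by
  rw [steps]; simp [hn, hk, h]

-- divisibility facts used on the divide branch
theorem div_branch_facts (n k : Int) (hn : 1 < n) (hk : 2 ≤ k)
    (h : PySem.Int.mod n k = 0) :
    1 ≤ PySem.Int.floordiv n k ∧ PySem.Int.floordiv n k < n := by
  have hkpos : (0:Int) < k := by omega
  have hdiv := PySem.Int.floordiv_eq_ediv_of_pos (a := n) hkpos
  have hmod := PySem.Int.mod_eq_emod_of_pos (a := n) hkpos
  rw [hdiv]
  constructor
  · rcases (PySem.Int.mod_eq_zero_iff_dvd n k).1 h with ⟨c, hc⟩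
    have hc1 : 1 ≤ c := by nlinarith
    have : n / k = c := by rw [hc]; exact Int.mul_ediv_cancel_left c (by omega)
    omega
  · have h2 : 0 ≤ n / k := Int.ediv_nonneg (by omega) (by omega)
    have h3 := Int.mul_ediv_add_emod n k
    have h4 := Int.emod_nonneg n (by omega : k ≠ 0)
    nlinarith

-- A's loop computes cnt + steps n k whenever the fuel suffices
theorem solutionLoop_eq (fuel : Nat) :
    ∀ n cnt k : Int, 1 ≤ n → 2 ≤ k → n.toNat ≤ fuel + 1 →
      solutionLoop fuel n k cnt = cnt + steps n k := by
  induction fuel with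
  | zero =>
    intro n cnt k hn hk hf
    have : n = 1 := by omega
    subst this
    simp [solutionLoop, steps_one]
  | succ fuel ih =>
    intro n cnt k hn hk hf
    by_cases h1 : n = 1
    · subst h1; simp [solutionLoop, steps_one]
    · have hn1 : 1 < n := by omega
      by_cases hm : PySem.Int.mod n k = 0
      · obtain ⟨hq1, hqlt⟩ := div_branch_facts n k hn1 hk hm
        rw [solutionLoop]
        simp only [h1, hm, if_false, if_true]
        rw [ih (PySem.Int.floordiv n k) (cnt + 1) k hq1 hk (by omega),
            steps_div n k hn1 hk hm]
        ring_nf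
      · rw [solutionLoop]
        simp only [h1, hm, if_false]
        rw [ih (n - 1) (cnt + 1) k (by omega) hk (by omega),
            steps_sub n k hn1 hk hm]
        ring_nf

-- below k, the count is a pure subtraction chain: steps n k = n - 1
theorem steps_below (m : Nat) : ∀ n k : Int, 1 ≤ n → 2 ≤ k → n < k →
    n.toNat ≤ m → steps n k = n - 1 := by
  induction m with
  | zero => intro n k hn hk hnk hm; omega
  | succ m ih =>
    intro n k hn hk hnk hm
    by_cases h1 : n = 1
    · subst h1; simp [steps_one]
    · have hn1 : 1 < n := by omega
      have hkpos : (0:Int) < k := by omega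
      have hm' : PySem.Int.mod n k ≠ 0 := by
        rw [PySem.Int.mod_eq_emod_of_pos hkpos]
        rw [Int.emod_eq_of_lt (by omega) hnk]
        omega
      rw [steps_sub n k hn1 hk hm', ih (n - 1) k (by omega) hk (by omega) (by omega)]
      ring_nf

-- batching the subtraction: r consecutive subtract-steps
theorem steps_chunk (r : Nat) : ∀ n k : Int, 2 ≤ k → 2 ≤ n - r →
    PySem.Int.mod n k = (r : Int) →
    steps n k = (r : Int) + steps (n - r) k := by
  induction r with
  | zero => intro n k hk hnr h; simp
  | succ r ih =>
    intro n k hk hnr h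
    have hkpos : (0:Int) < k := by omega
    have hrk : (r : Int) + 1 < k := by
      have := PySem.Int.mod_lt (a := n) hkpos
      push_cast at h ⊢; omega
    have hn1 : 1 < n := by push_cast at hnr ⊢; omega
    have hm' : PySem.Int.mod n k ≠ 0 := by rw [h]; push_cast; omega
    have hnext : PySem.Int.mod (n - 1) k = (r : Int) := by
      rw [PySem.Int.mod_eq_emod_of_pos hkpos] at h ⊢
      have h1k : (1 : Int) % k = 1 := Int.emod_eq_of_lt (by omega) (by omega)
      rw [Int.sub_emod, h, h1k]
      have hc : ((r + 1 : Nat) : Int) - 1 = (r : Int) := by push_cast; omega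
      rw [hc, Int.emod_eq_of_lt (by omega) (by omega)]
    rw [steps_sub n k hn1 hk hm']
    rw [ih (n - 1) k hk (by push_cast at hnr ⊢; omega) hnext]
    push_cast; ring_nf

-- B's digit formula also computes steps n k
theorem digits_eq (fuel : Nat) :
    ∀ n k : Int, 1 ≤ n → 2 ≤ k → n.toNat ≤ fuel →
      (digitsLoop fuel n k).sum + ((digitsLoop fuel n k).length : Int) - 2
        = steps n k := by
  induction fuel with
  | zero => intro n k hn hk hf; omega
  | succ fuel ih =>
    intro n k hn hk hf
    have hkpos : (0:Int) < k := by omega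
    have hn0 : n ≠ 0 := by omega
    by_cases hlt : n < k
    · -- one digit: n itself; the quotient is 0 and the tail is []
      have hmod : PySem.Int.mod n k = n := by
        rw [PySem.Int.mod_eq_emod_of_pos hkpos, Int.emod_eq_of_lt (by omega) hlt]
      have hdiv : PySem.Int.floordiv n k = 0 := by
        rw [PySem.Int.floordiv_eq_ediv_of_pos hkpos]
        exact Int.ediv_eq_zero_of_lt (by omega) hlt
      have htail : ∀ f : Nat, digitsLoop f 0 k = [] := by
        intro f; cases f <;> simp [digitsLoop]
      rw [digitsLoop]
      simp only [hn0, if_pos, ne_eq, not_false_iff, hmod, hdiv, htail]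
      rw [steps_below n.toNat n k hn hk hlt (le_refl _)]
      simp
      omega
    · -- n ≥ k: digit r = n % k, then recurse on q = n // k
      have hge : k ≤ n := by omega
      have hn1 : 1 < n := by omega
      have hr0 : 0 ≤ PySem.Int.mod n k := PySem.Int.mod_nonneg (a := n) hkpos
      have hrk : PySem.Int.mod n k < k := PySem.Int.mod_lt (a := n) hkpos
      have hq1 : 1 ≤ PySem.Int.floordiv n k := by
        rw [PySem.Int.floordiv_eq_ediv_of_pos hkpos]
        exact (Int.le_ediv_iff_mul_le hkpos).mpr (by omega)
      have hqlt : PySem.Int.floordiv n k < n := by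
        rw [PySem.Int.floordiv_eq_ediv_of_pos hkpos]
        have h2 : 0 ≤ n / k := Int.ediv_nonneg (by omega) (by omega)
        have h3 := Int.mul_ediv_add_emod n k
        have h4 := Int.emod_nonneg n (by omega : k ≠ 0)
        nlinarith
      obtain ⟨m, hmm⟩ : ∃ m : Nat, PySem.Int.mod n k = (m : Int) :=
        ⟨(PySem.Int.mod n k).toNat, by omega⟩
      -- steps n k = (n % k) + 1 + steps (n // k) k
      have hkey : steps n k = (m : Int) + 1 + steps (PySem.Int.floordiv n k) k := by
        by_cases hz : PySem.Int.mod n k = 0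
        · have hm0 : (m : Int) = 0 := by omega
          rw [steps_div n k hn1 hk hz, hm0]; ring_nf
        · have hdvd : k ∣ (n - (m : Int)) := by
            rw [PySem.Int.mod_eq_emod_of_pos hkpos] at hmm
            exact Int.dvd_self_sub_of_emod_eq hmm
          have hkle : k ≤ n - (m : Int) := Int.le_of_dvd (by omega) hdvd
          have hmz : PySem.Int.mod (n - (m : Int)) k = 0 := by
            rw [PySem.Int.mod_eq_emod_of_pos hkpos]
            exact Int.emod_eq_zero_of_dvd hdvd
          have hqeq : PySem.Int.floordiv (n - (m : Int)) k = PySem.Int.floordiv n k := by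
            rw [PySem.Int.floordiv_eq_ediv_of_pos hkpos,
                PySem.Int.floordiv_eq_ediv_of_pos hkpos]
            rw [PySem.Int.mod_eq_emod_of_pos hkpos] at hmm
            have he : n - (m : Int) = k * (n / k) := by
              have := Int.mul_ediv_add_emod n k; omega
            rw [he, Int.mul_ediv_cancel_left _ (by omega : k ≠ 0)]
          rw [steps_chunk m n k hk (by omega) hmm,
              steps_div (n - (m : Int)) k (by omega) hk hmz, hqeq]
          ring_nf
      rw [digitsLoop]
      simp only [hn0, ne_eq, not_false_iff, if_true]
      rw [List.sum_cons, List.length_cons]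
      rw [show ((digitsLoop fuel (PySem.Int.floordiv n k) k).length + 1 : Nat) = 
            (digitsLoop fuel (PySem.Int.floordiv n k) k).length + 1 from rfl]
      push_cast
      have hih := ih (PySem.Int.floordiv n k) k hq1 hk (by omega)
      rw [hkey, hmm]
      omega

-- ===== VERDICT (by name: the statement is the Claim_ definition above) =====
theorem solution_spec : Claim_equal_solution := by
  intro n k _ hpre
  obtain ⟨hn, hk⟩ := hpre
  unfold Spec_solution solution solution_alt
  rw [solutionLoop_eq n.toNat n 0 k hn hk (by omega)]
  rw [digits_eq n.toNat n k hn hk (le_refl _)]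
  omega
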